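-- pv_equiv track=rewrite | github.com/shubham3-ucb/sparse-attention-hub | plot_ruler16k.py | group_metrics_by_sample
-- ===== SOURCE A (Python) =====
-- from typing import Dict, List, Tuple, Any, Optional
--
-- def group_metrics_by_sample(metrics: List[Dict], chunk_threshold: int = 100) -> List[List[Dict]]:
--     """
--     Group metrics by sample/example.
--
--     Detects sample boundaries by:
--     - Reset to first chunk (seq_len_q == seq_len_k and seq_len_q >= chunk_threshold) after generation (seq_len_q == 1)
--     """
--     if not metrics:
--         return []
--
--     samples: List[List[Dict]] = []
--     current_sample: List[Dict] = []
--
--     prev_seq_len_q = None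
--
--     for metric in metrics:
--         metadata = metric.get("metadata", {})
--         seq_len_q = metadata.get("seq_len_q", 0)
--         seq_len_k = metadata.get("seq_len_k", 0)
--
--         # Detect new sample: reset to first chunk after generation
--         is_new_sample = False
--
--         if prev_seq_len_q == 1 and seq_len_q == seq_len_k and seq_len_q >= chunk_threshold:
--             is_new_sample = True
--
--         if is_new_sample and current_sample:
--             samples.append(current_sample)
--             current_sample = []
--
--         current_sample.append(metric)
--         prev_seq_len_q = seq_len_q
--
--     # Add last sample
--     if current_sample:
--         samples.append(current_sample)
--
--     return samples
-- ===== SOURCE B (Python) =====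
-- from typing import Dict, List
--
-- def group_metrics_by_sample(metrics: List[Dict], chunk_threshold: int = 100) -> List[List[Dict]]:
--     """Group metrics into samples: collect boundary indices in one pass, then slice."""
--     if not metrics:
--         return []
--     n = len(metrics)
--
--     def qk(m):
--         md = m.get("metadata", {})
--         return md.get("seq_len_q", 0), md.get("seq_len_k", 0)
--
--     bounds = [0]
--     i = 1
--     for prev, cur in zip(metrics, metrics[1:]):
--         q, k = qk(cur)
--         if qk(prev)[0] == 1 and q == k and q >= chunk_threshold:
--             bounds.append(i)
--         i += 1
--     bounds.append(n)
--     return [metrics[a:b] for a, b in zip(bounds, bounds[1:])]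
-- ===== Notes on version B (the rewrite author's own statement) =====
-- stated objective: alternative
-- what changed: Replaces A's single accumulate-and-flush loop with mutable current-sample/prev state by a two-phase decomposition: one pass over adjacent pairs collecting boundary indices, then slicing the list between consecutive boundaries.
import Mathlib
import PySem

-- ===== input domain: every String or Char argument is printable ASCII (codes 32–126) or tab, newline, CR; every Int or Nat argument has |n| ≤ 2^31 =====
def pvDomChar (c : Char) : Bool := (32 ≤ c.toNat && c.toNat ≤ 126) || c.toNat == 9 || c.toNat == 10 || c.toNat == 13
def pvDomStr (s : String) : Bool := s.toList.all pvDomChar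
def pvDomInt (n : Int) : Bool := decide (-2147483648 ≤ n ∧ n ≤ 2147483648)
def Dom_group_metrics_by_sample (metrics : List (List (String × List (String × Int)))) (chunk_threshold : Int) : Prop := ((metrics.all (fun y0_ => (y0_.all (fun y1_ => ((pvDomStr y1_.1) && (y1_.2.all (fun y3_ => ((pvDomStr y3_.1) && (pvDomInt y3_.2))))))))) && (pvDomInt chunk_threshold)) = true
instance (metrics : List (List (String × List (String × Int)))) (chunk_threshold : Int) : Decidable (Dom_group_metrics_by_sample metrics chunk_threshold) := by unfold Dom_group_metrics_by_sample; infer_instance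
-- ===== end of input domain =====

-- B replaces A's accumulate-and-flush loop by a boundary-index pass followed by slicing (objective: alternative decomposition, same cost).

-- shared helper: Python dict.get(k, default) on an association list (first match)
def pyDictGetD {α : Type} (d : List (String × α)) (k : String) (dflt : α) : α :=
  ((d.find? (fun p => p.1 == k)).map (·.2)).getD dflt

-- ===== PORT A =====
-- loop body of A's for-loop, state = (samples, current_sample, prev_seq_len_q)
def stepA (chunk_threshold : Int)
    (st : List (List (List (String × List (String × Int)))) × List (List (String × List (String × Int))) × Option Int)
    (metric : List (String × List (String × Int))) :
    List (List (List (String × List (String × Int)))) × List (List (String × List (String × Int))) × Option Int :=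
  let metadata := pyDictGetD metric "metadata" []
  let seq_len_q := pyDictGetD metadata "seq_len_q" 0
  let seq_len_k := pyDictGetD metadata "seq_len_k" 0
  let is_new_sample : Bool := (st.2.2 == some 1) && (seq_len_q == seq_len_k) && decide (seq_len_q ≥ chunk_threshold)
  if is_new_sample && !st.2.1.isEmpty then
    (st.1 ++ [st.2.1], ([] : List (List (String × List (String × Int)))) ++ [metric], some seq_len_q)
  else
    (st.1, st.2.1 ++ [metric], some seq_len_q)

def group_metrics_by_sample (metrics : List (List (String × List (String × Int)))) (chunk_threshold : Int) : List (List (List (String × List (String × Int)))) :=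
  if metrics.isEmpty then []
  else
    let st := metrics.foldl (stepA chunk_threshold) ([], [], none)
    if st.2.1.isEmpty then st.1 else st.1 ++ [st.2.1]

-- ===== PORT B =====
-- seq_len_q / seq_len_k of a metric (B's helper qk)
def qkB (m : List (String × List (String × Int))) : Int × Int :=
  let md := pyDictGetD m "metadata" []
  (pyDictGetD md "seq_len_q" 0, pyDictGetD md "seq_len_k" 0)

-- loop body of B's boundary-collection loop, state = (bounds, i)
def stepB (chunk_threshold : Int) (st : List Int × Int)
    (pc : (List (String × List (String × Int))) × (List (String × List (String × Int)))) : List Int × Int :=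
  let qk := qkB pc.2
  if ((qkB pc.1).1 == 1) && (qk.1 == qk.2) && decide (qk.1 ≥ chunk_threshold) then
    (st.1 ++ [st.2], st.2 + 1)
  else
    (st.1, st.2 + 1)

def group_metrics_by_sample_alt (metrics : List (List (String × List (String × Int)))) (chunk_threshold : Int) : List (List (List (String × List (String × Int)))) :=
  if metrics.isEmpty then []
  else
    let n : Int := metrics.length
    let st := (metrics.zip (PySem.List.slice metrics (some 1) none)).foldl (stepB chunk_threshold) ([0], 1)
    let bounds := st.1 ++ [n]
    (bounds.zip bounds.tail).map (fun ab => PySem.List.slice metrics (some ab.1) (some ab.2))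

-- ===== PRECONDITION & SPEC =====
def Spec_group_metrics_by_sample (metrics : List (List (String × List (String × Int)))) (chunk_threshold : Int) (out : List (List (List (String × List (String × Int))))) : Prop := out = group_metrics_by_sample_alt metrics chunk_threshold
instance (metrics : List (List (String × List (String × Int)))) (chunk_threshold : Int) (out : List (List (List (String × List (String × Int))))) : Decidable (Spec_group_metrics_by_sample metrics chunk_threshold out) := by unfold Spec_group_metrics_by_sample; infer_instance

-- ===== CLAIM (what is proved, stated in full; the proofs are below) =====
def Claim_equal_group_metrics_by_sample : Prop := ∀ (metrics : List (List (String × List (String × Int)))) (chunk_threshold : Int), Dom_group_metrics_by_sample metrics chunk_threshold → Spec_group_metrics_by_sample metrics chunk_threshold (group_metrics_by_sample metrics chunk_threshold)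

-- ===== LEMMAS AND PROOFS =====

-- the boundary test between adjacent metrics p, x
def bndB (t : Int) (p x : List (String × List (String × Int))) : Bool :=
  ((qkB p).1 == 1) && ((qkB x).1 == (qkB x).2) && decide ((qkB x).1 ≥ t)

-- common functional specification: grouping with current chunk c and previous seq_len_q pq
def G (t : Int) (c : List (List (String × List (String × Int)))) (pq : Int) :
    List (List (String × List (String × Int))) → List (List (List (String × List (String × Int))))
  | [] => if c = [] then [] else [c]
  | x :: rest =>
    if ((pq == 1) && ((qkB x).1 == (qkB x).2) && decide ((qkB x).1 ≥ t)) && !(c.isEmpty) then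
      c :: G t [x] (qkB x).1 rest
    else
      G t (c ++ [x]) (qkB x).1 rest

def packA (st : List (List (List (String × List (String × Int)))) × List (List (String × List (String × Int))) × Option Int) :
    List (List (List (String × List (String × Int)))) :=
  if st.2.1.isEmpty then st.1 else st.1 ++ [st.2.1]

lemma lemA (t : Int) (rest : List (List (String × List (String × Int))))
    (s : List (List (List (String × List (String × Int))))) (c : List (List (String × List (String × Int))))
    (pq : Int) (hc : c ≠ []) :
    packA (rest.foldl (stepA t) (s, c, some pq)) = s ++ G t c pq rest := by
  induction rest generalizing s c pq with
  | nil => simp [packA, G, hc]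
  | cons x rest ih =>
    simp only [List.foldl_cons]
    by_cases hb : ((pq == 1) && ((qkB x).1 == (qkB x).2) && decide ((qkB x).1 ≥ t)) = true
    · have hA : stepA t (s, c, some pq) x = (s ++ [c], [x], some (qkB x).1) := by
        simp [stepA, qkB, List.isEmpty_iff, hc]
        simp only [qkB, Bool.and_eq_true, beq_iff_eq, decide_eq_true_eq, ge_iff_le] at hb ⊢
        tauto
      rw [hA, ih _ _ _ (by simp)]
      rw [G]
      have hce : c.isEmpty = false := by simp [List.isEmpty_iff, hc]
      simp only [hb, hce, Bool.not_false, Bool.and_true, if_pos]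
      simp
    · have hA : stepA t (s, c, some pq) x = (s, c ++ [x], some (qkB x).1) := by
        simp only [stepA, qkB]
        simp only [qkB, Bool.and_eq_true, beq_iff_eq, decide_eq_true_eq] at hb
        have : ((some pq == some 1) && (pyDictGetD (pyDictGetD x "metadata" []) "seq_len_q" 0 == pyDictGetD (pyDictGetD x "metadata" []) "seq_len_k" 0) &&
            decide (pyDictGetD (pyDictGetD x "metadata" []) "seq_len_q" 0 ≥ t)) = false := by
          simp only [Option.some_beq_some]
          revert hb
          cases h1 : (pq == 1) <;> cases h2 : (pyDictGetD (pyDictGetD x "metadata" []) "seq_len_q" 0 == pyDictGetD (pyDictGetD x "metadata" []) "seq_len_k" 0) <;>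
            cases h3 : decide (pyDictGetD (pyDictGetD x "metadata" []) "seq_len_q" 0 ≥ t) <;> simp_all [qkB]
        rw [this]
        simp
      rw [hA, ih _ _ _ (by simp)]
      rw [G]
      simp only [hb, Bool.false_and, if_neg]
      simp

-- relative boundary indices (1-based) of a pair list
def relIdx (t : Int) : List ((List (String × List (String × Int))) × (List (String × List (String × Int)))) → List Int
  | [] => []
  | p :: ps => (if bndB t p.1 p.2 then [(1 : Int)] else []) ++ (relIdx t ps).map (· + 1)

lemma relIdx_pos (t : Int) (ps : List ((List (String × List (String × Int))) × (List (String × List (String × Int)))))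
    (e : Int) (he : e ∈ relIdx t ps) : 1 ≤ e := by
  induction ps generalizing e with
  | nil => simp [relIdx] at he
  | cons p ps ih =>
    simp only [relIdx, List.mem_append, List.mem_map] at he
    rcases he with he | ⟨a, ha, rfl⟩
    · split at he <;> simp_all
    · have := ih a ha; omega

lemma lemFold (t : Int) (ps : List ((List (String × List (String × Int))) × (List (String × List (String × Int)))))
    (bs : List Int) (i : Int) :
    ps.foldl (stepB t) (bs, i) = (bs ++ (relIdx t ps).map (· + (i - 1)), i + ps.length) := by
  induction ps generalizing bs i with
  | nil => simp [relIdx]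
  | cons p ps ih =>
    simp only [List.foldl_cons]
    by_cases hb : bndB t p.1 p.2 = true
    · have hs : stepB t (bs, i) p = (bs ++ [i], i + 1) := by
        simp only [stepB, bndB] at hb ⊢
        rw [hb]; simp
      rw [hs, ih]
      simp only [relIdx, hb, if_pos, List.map_append, List.map_map, List.append_assoc,
        Prod.mk.injEq, List.map_cons, List.map_nil, List.cons_append, List.nil_append]
      constructor
      · apply congrArg
        have h1 : 1 + (i - 1) = i := by ring
        rw [h1]
        apply congrArg
        apply List.map_congr_left; intro a _; simp
      · simp; omega
    · have hs : stepB t (bs, i) p = (bs, i + 1) := by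
        simp only [stepB, bndB] at hb ⊢
        rw [Bool.of_not_eq_true hb]
        simp
      rw [hs, ih]
      simp only [relIdx, hb, if_neg, Bool.not_eq_true, List.map_map, List.nil_append,
        Prod.mk.injEq]
      refine ⟨?_, by simp; omega⟩
      apply congrArg
      apply List.map_congr_left; intro a _; simp

def mkGroups (xs : List (List (String × List (String × Int)))) (bounds : List Int) :
    List (List (List (String × List (String × Int)))) :=
  (bounds.zip bounds.tail).map (fun ab => PySem.List.slice xs (some ab.1) (some ab.2))

def consHead (m : List (String × List (String × Int))) :
    List (List (List (String × List (String × Int)))) → List (List (List (String × List (String × Int))))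
  | [] => [[m]]
  | g :: gs => (m :: g) :: gs

lemma slice_cons_pos {α : Type} (m : α) (tail : List α) (a b : Int) (ha : 1 ≤ a) (hb : 1 ≤ b) :
    PySem.List.slice (m :: tail) (some a) (some b) = PySem.List.slice tail (some (a - 1)) (some (b - 1)) := by
  rw [PySem.List.slice_toNat _ (by omega) (by omega), PySem.List.slice_toNat _ (by omega) (by omega)]
  have h1 : a.toNat = (a - 1).toNat + 1 := by omega
  have h2 : b.toNat - ((a - 1).toNat + 1) = (b - 1).toNat - (a - 1).toNat := by omega
  rw [h1, h2, List.drop_succ_cons]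

lemma slice_cons_zero {α : Type} (m : α) (tail : List α) (b : Int) (hb : 1 ≤ b) :
    PySem.List.slice (m :: tail) (some 0) (some b) = m :: PySem.List.slice tail (some 0) (some (b - 1)) := by
  rw [PySem.List.slice_toNat _ (by omega) (by omega), PySem.List.slice_toNat _ (by omega) (by omega)]
  simp only [List.drop_zero, Int.toNat_zero, Nat.sub_zero]
  have h1 : b.toNat = (b - 1).toNat + 1 := by omega
  rw [h1, List.take_succ_cons]

lemma mkGroups_shift_all (m : List (String × List (String × Int))) (tail : List (List (String × List (String × Int))))
    (bs : List Int) (h : ∀ e ∈ bs, 1 ≤ e) :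
    mkGroups (m :: tail) bs = mkGroups tail (bs.map (· - 1)) := by
  induction bs with
  | nil => simp [mkGroups]
  | cons b bs ih =>
    cases bs with
    | nil => simp [mkGroups]
    | cons c bs' =>
      have hb : (1 : Int) ≤ b := h b (by simp)
      have hc : (1 : Int) ≤ c := h c (by simp)
      have ih' := ih (fun e he => h e (by simp [he]))
      simp only [mkGroups, List.map_cons, List.tail_cons, List.zip_cons_cons] at ih' ⊢
      rw [slice_cons_pos m tail b c hb hc]
      rw [ih']

lemma mkGroups_shift (m : List (String × List (String × Int))) (tail : List (List (String × List (String × Int))))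
    (L : List Int) (hne : L ≠ []) (h : ∀ e ∈ L, 1 ≤ e) :
    mkGroups (m :: tail) (0 :: L) = consHead m (mkGroups tail (0 :: L.map (· - 1))) := by
  cases L with
  | nil => exact absurd rfl hne
  | cons b L2 =>
    have hb : (1 : Int) ≤ b := h b (by simp)
    have hall : mkGroups (m :: tail) (b :: L2) = mkGroups tail ((b :: L2).map (· - 1)) :=
      mkGroups_shift_all m tail (b :: L2) h
    simp only [mkGroups, List.map_cons, List.tail_cons, List.zip_cons_cons] at hall ⊢
    rw [slice_cons_zero m tail b hb]
    rw [hall]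
    rfl

lemma consHead_G (t : Int) (rest : List (List (String × List (String × Int))))
    (m : List (String × List (String × Int))) (c : List (List (String × List (String × Int)))) (pq : Int)
    (hc : c ≠ []) :
    G t (m :: c) pq rest = consHead m (G t c pq rest) := by
  induction rest generalizing c pq with
  | nil => simp [G, hc, consHead]
  | cons x rest ih =>
    rw [G, G]
    have hce : c.isEmpty = false := by simp [List.isEmpty_iff, hc]
    have hmce : (m :: c).isEmpty = false := by simp
    by_cases hb : ((pq == 1) && ((qkB x).1 == (qkB x).2) && decide ((qkB x).1 ≥ t)) = true
    · simp only [hb, hce, hmce, Bool.not_false, Bool.and_true, if_pos]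
      rfl
    · simp only [Bool.not_eq_true] at hb
      simp only [hb, Bool.false_and, if_neg, Bool.false_eq_true, not_false_iff]
      have := ih (c ++ [x]) (qkB x).1 (by simp)
      simpa using this

lemma lemB (t : Int) (rest : List (List (String × List (String × Int)))) (m : List (String × List (String × Int))) :
    mkGroups (m :: rest) (0 :: (relIdx t ((m :: rest).zip rest) ++ [((m :: rest).length : Int)]))
      = G t [m] (qkB m).1 rest := by
  induction rest generalizing m with
  | nil =>
    have h1 : PySem.List.slice [m] (some (0 : Int)) (some (1 : Int)) = [m] := by
      rw [PySem.List.slice_toNat _ (by omega) (by omega)]; simp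
    simp [relIdx, mkGroups, G, h1]
  | cons x rest' ih =>
    have hzip : (m :: x :: rest').zip (x :: rest') = (m, x) :: ((x :: rest').zip rest') := by
      simp
    have hL : relIdx t ((m :: x :: rest').zip (x :: rest'))
        = (if bndB t m x then [(1 : Int)] else []) ++ (relIdx t ((x :: rest').zip rest')).map (· + 1) := by
      rw [hzip]; rfl
    have hn : ((m :: x :: rest').length : Int) = ((x :: rest').length : Int) + 1 := by
      simp
    have hpos : ∀ e ∈ relIdx t ((m :: x :: rest').zip (x :: rest')) ++ [((m :: x :: rest').length : Int)], 1 ≤ e := by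
      intro e he
      rcases List.mem_append.mp he with h1 | h1
      · exact relIdx_pos t _ e h1
      · simp only [List.mem_singleton] at h1
        subst h1
        have : 0 < (m :: x :: rest').length := by simp
        omega
    rw [mkGroups_shift m (x :: rest') _ (by simp) hpos]
    have hmm : ((relIdx t ((x :: rest').zip rest')).map (· + 1)).map (· - 1) = relIdx t ((x :: rest').zip rest') := by
      rw [List.map_map]
      have : ∀ a ∈ relIdx t ((x :: rest').zip rest'), ((· - 1) ∘ (· + 1) : Int → Int) a = id a := by
        intro a _; simp
      rw [List.map_congr_left this, List.map_id]
    by_cases hb : bndB t m x = true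
    · rw [hL]
      simp only [hb, if_pos, List.cons_append, List.nil_append, List.map_cons, List.map_append,
        hmm, List.map_cons, List.map_nil]
      have h10 : (1 : Int) - 1 = 0 := by norm_num
      rw [h10, hn]
      have hn1 : ((x :: rest').length : Int) + 1 - 1 = ((x :: rest').length : Int) := by ring
      rw [hn1]
      have hsplit : mkGroups (x :: rest') (0 :: 0 :: (relIdx t ((x :: rest').zip rest') ++ [((x :: rest').length : Int)]))
          = PySem.List.slice (x :: rest') (some 0) (some 0)
            :: mkGroups (x :: rest') (0 :: (relIdx t ((x :: rest').zip rest') ++ [((x :: rest').length : Int)])) := by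
        simp [mkGroups]
      have hs00 : PySem.List.slice (x :: rest') (some (0 : Int)) (some (0 : Int)) = [] := by
        rw [PySem.List.slice_toNat _ (by omega) (by omega)]; simp
      rw [hsplit, hs00, ih x]
      rw [G]
      have hbb : (((qkB m).1 == 1) && ((qkB x).1 == (qkB x).2) && decide ((qkB x).1 ≥ t)) = true := hb
      simp only [hbb, List.isEmpty_cons, Bool.not_false, Bool.and_true, if_pos]
      rfl
    · rw [hL]
      simp only [hb, if_neg, Bool.not_eq_true, List.nil_append, List.map_append, hmm,
        List.map_cons, List.map_nil]
      rw [hn]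
      have hn1 : ((x :: rest').length : Int) + 1 - 1 = ((x :: rest').length : Int) := by ring
      rw [hn1, ih x]
      rw [G]
      have hbb : (((qkB m).1 == 1) && ((qkB x).1 == (qkB x).2) && decide ((qkB x).1 ≥ t)) = false := by
        simpa [bndB] using hb
      simp only [hbb, Bool.false_and, if_neg, Bool.false_eq_true, not_false_iff]
      have : G t ([m] ++ [x]) (qkB x).1 rest' = G t (m :: [x]) (qkB x).1 rest' := rfl
      rw [this, consHead_G t rest' m [x] (qkB x).1 (by simp)]

-- ===== VERDICT (by name: the statement is the Claim_ definition above) =====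
theorem group_metrics_by_sample_spec : Claim_equal_group_metrics_by_sample := by
  intro metrics t _
  unfold Spec_group_metrics_by_sample
  cases metrics with
  | nil => rfl
  | cons m tail =>
    have hA : group_metrics_by_sample (m :: tail) t
        = packA ((m :: tail).foldl (stepA t) ([], [], none)) := by
      simp [group_metrics_by_sample, packA]
    have hstep : stepA t ([], [], none) m = ([], [] ++ [m], some (qkB m).1) := by
      simp [stepA, qkB]
    have hAval : group_metrics_by_sample (m :: tail) t = G t [m] (qkB m).1 tail := by
      rw [hA, List.foldl_cons, hstep]
      have := lemA t tail [] ([] ++ [m]) (qkB m).1 (by simp)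
      simpa using this
    have hBfold := lemFold t ((m :: tail).zip tail) [0] 1
    have hmap0 : (relIdx t ((m :: tail).zip tail)).map (· + ((1 : Int) - 1)) = relIdx t ((m :: tail).zip tail) := by
      have : ∀ a ∈ relIdx t ((m :: tail).zip tail), a + ((1 : Int) - 1) = id a := by
        intro a _; simp
      rw [List.map_congr_left this, List.map_id]
    have hBval : group_metrics_by_sample_alt (m :: tail) t
        = mkGroups (m :: tail) (0 :: (relIdx t ((m :: tail).zip tail) ++ [((m :: tail).length : Int)])) := by
      show (let n : Int := (m :: tail).length
            let st := ((m :: tail).zip (PySem.List.slice (m :: tail) (some 1) none)).foldl (stepB t) ([0], 1)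
            let bounds := st.1 ++ [n]
            (bounds.zip bounds.tail).map (fun ab => PySem.List.slice (m :: tail) (some ab.1) (some ab.2)))
          = _
      rw [PySem.List.slice_from_one]
      simp only [List.tail_cons]
      rw [hBfold]
      simp only [hmap0]
      rfl
    rw [hAval, hBval, lemB t tail m]
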